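-- pv_equiv track=rewrite | github.com/srp33/BCSP | code/VariantUtilities.py | summarizeMetaItems
-- ===== SOURCE A (Python) =====
-- def summarizeMetaItems(alt, rawMeta, snpEffItems):
--     effect = ",".join(sorted(list(set([x[0] for x in snpEffItems]))))
--     impactLevel = ",".join(sorted(list(set([x[1] for x in snpEffItems]))))
--     sift = parsePathogenicityValue(rawMeta, "SIFT", alt)
--     polyphen = parsePathogenicityValue(rawMeta, "Polyphen", alt)
--     mutassr = parsePathogenicityValue(rawMeta, "MutAssr", alt)
--     condelScore = parsePathogenicityValue(rawMeta, "CondelScore", alt)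
--     condelCall = parsePathogenicityValue(rawMeta, "CondelCall", alt)
--
--     return {"VariantEffect": effect, "VariantImpactLevel": impactLevel, "SIFT": sift, "Polyphen": polyphen, "MutAssr": mutassr, "CondelScore": condelScore, "CondelCall": condelCall}
--
-- def parsePathogenicityValue(rawMeta, key, alt):
--     items = [y for y in rawMeta.split(';') if y.startswith("%s" % key)]
--
--     for item in rawMeta.split(";"):
--         if item.startswith("%s" % key) and alt == item.split("=")[0].split("__")[1]:
--             return item.split("=")[1]
--
--     return ""
-- ===== SOURCE B (Python) =====
-- def summarizeMetaItems(alt, rawMeta, snpEffItems):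
--     # One pass over the metadata entries with a found-flag per key,
--     # instead of re-scanning rawMeta once per pathogenicity key.
--     sift = polyphen = mutassr = condelScore = condelCall = ""
--     fSift = fPolyphen = fMutassr = fCondelScore = fCondelCall = False
--     for item in rawMeta.split(";"):
--         if item.startswith("SIFT") and not fSift and alt == item.split("=")[0].split("__")[1]:
--             sift, fSift = item.split("=")[1], True
--         if item.startswith("Polyphen") and not fPolyphen and alt == item.split("=")[0].split("__")[1]:
--             polyphen, fPolyphen = item.split("=")[1], True
--         if item.startswith("MutAssr") and not fMutassr and alt == item.split("=")[0].split("__")[1]: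
--             mutassr, fMutassr = item.split("=")[1], True
--         if item.startswith("CondelScore") and not fCondelScore and alt == item.split("=")[0].split("__")[1]:
--             condelScore, fCondelScore = item.split("=")[1], True
--         if item.startswith("CondelCall") and not fCondelCall and alt == item.split("=")[0].split("__")[1]:
--             condelCall, fCondelCall = item.split("=")[1], True
--
--     return {"VariantEffect": ",".join(sorted({x[0] for x in snpEffItems})),
--             "VariantImpactLevel": ",".join(sorted({x[1] for x in snpEffItems})),
--             "SIFT": sift, "Polyphen": polyphen, "MutAssr": mutassr,
--             "CondelScore": condelScore, "CondelCall": condelCall}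
-- ===== Notes on version B (the rewrite author's own statement) =====
-- stated objective: alternative
-- what changed: B replaces A's five independent scans of rawMeta.split(';') (one per pathogenicity key, each re-splitting the string) with a single pass over the entries that maintains a value and a found-flag per key, taking the first alt-matching entry for each key.
import Mathlib
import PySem

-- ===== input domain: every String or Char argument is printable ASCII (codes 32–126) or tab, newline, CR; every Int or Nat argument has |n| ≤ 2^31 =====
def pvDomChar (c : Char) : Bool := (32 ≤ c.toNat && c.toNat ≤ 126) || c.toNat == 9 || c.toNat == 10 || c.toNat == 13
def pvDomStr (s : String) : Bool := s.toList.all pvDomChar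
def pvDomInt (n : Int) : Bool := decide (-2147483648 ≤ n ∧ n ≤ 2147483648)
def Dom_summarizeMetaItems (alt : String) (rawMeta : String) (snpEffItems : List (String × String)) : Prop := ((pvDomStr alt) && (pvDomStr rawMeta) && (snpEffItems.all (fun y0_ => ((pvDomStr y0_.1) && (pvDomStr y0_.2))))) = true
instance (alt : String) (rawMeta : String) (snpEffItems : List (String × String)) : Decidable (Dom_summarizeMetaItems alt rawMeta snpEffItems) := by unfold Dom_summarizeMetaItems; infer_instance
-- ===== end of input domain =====

-- B replaces A's five separate scans of rawMeta.split(';') (one per pathogenicity key) with a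
-- single pass keeping a (value, found) pair per key (same asymptotics, fewer passes).


-- Shared transliterations of the Python subexpressions both programs use verbatim
-- rawMeta.split(";")
def pvEntries (rawMeta : String) : List (List Char) :=
  PySem.Chars.splitOn rawMeta.toList ";".toList
-- item.split("=")[0].split("__")[1]  — the [1] is an IndexError when absent; total form
-- (getD []) is used, Pre_ excludes exactly the entries where Python would raise
def pvTagParts (e : List Char) : List (List Char) :=
  PySem.Chars.splitOn ((PySem.Chars.splitOn e "=".toList).getD 0 []) "__".toList
def pvTag (e : List Char) : List Char := (pvTagParts e).getD 1 []
-- item.split("=")[1] — same totalization, guarded by Pre_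
def pvVal (e : List Char) : List Char := (PySem.Chars.splitOn e "=".toList).getD 1 []

-- ===== PORT A =====
-- the 'for item in rawMeta.split(";"): if …: return item.split("=")[1]' loop of parsePathogenicityValue
def pvScanA (alt key : List Char) : List (List Char) → List Char
  | [] => []
  | e :: rest =>
    if PySem.Chars.startswith e key && (alt == pvTag e) then pvVal e
    else pvScanA alt key rest

def parsePathogenicityValue (rawMeta : String) (key : String) (alt : String) : String :=
  -- items = [y for y in rawMeta.split(';') if y.startswith(key)]   (dead in the Python, kept)
  let _items := (pvEntries rawMeta).filter (fun y => PySem.Chars.startswith y key.toList)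
  String.ofList (pvScanA alt.toList key.toList (pvEntries rawMeta))

-- ",".join(sorted(list(set(xs))))
def pvJoinSorted (xs : List String) : String :=
  PySem.Str.join "," (PySem.List.sorted (PySem.Set.ofList xs) (fun x => x) false)

def summarizeMetaItems (alt : String) (rawMeta : String) (snpEffItems : List (String × String)) : List (String × String) :=
  let effect := pvJoinSorted (snpEffItems.map (fun x => x.1))
  let impactLevel := pvJoinSorted (snpEffItems.map (fun x => x.2))
  let sift := parsePathogenicityValue rawMeta "SIFT" alt
  let polyphen := parsePathogenicityValue rawMeta "Polyphen" alt
  let mutassr := parsePathogenicityValue rawMeta "MutAssr" alt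
  let condelScore := parsePathogenicityValue rawMeta "CondelScore" alt
  let condelCall := parsePathogenicityValue rawMeta "CondelCall" alt
  [("VariantEffect", effect), ("VariantImpactLevel", impactLevel), ("SIFT", sift),
   ("Polyphen", polyphen), ("MutAssr", mutassr), ("CondelScore", condelScore),
   ("CondelCall", condelCall)]

-- ===== PORT B =====
-- one 'if item.startswith(k) and not found and alt == …' statement of Source B's loop body
def pvUpd (alt key : List Char) (p : List Char × Bool) (e : List Char) : List Char × Bool :=
  if PySem.Chars.startswith e key && !p.2 && (alt == pvTag e) then (pvVal e, true) else p

-- the body of Source B's single 'for item in rawMeta.split(";")' loop: all five states updated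
def pvStep (alt : List Char)
    (st : (List Char × Bool) × (List Char × Bool) × (List Char × Bool) × (List Char × Bool) × (List Char × Bool))
    (e : List Char) :
    (List Char × Bool) × (List Char × Bool) × (List Char × Bool) × (List Char × Bool) × (List Char × Bool) :=
  (pvUpd alt "SIFT".toList st.1 e,
   pvUpd alt "Polyphen".toList st.2.1 e,
   pvUpd alt "MutAssr".toList st.2.2.1 e,
   pvUpd alt "CondelScore".toList st.2.2.2.1 e,
   pvUpd alt "CondelCall".toList st.2.2.2.2 e)

def summarizeMetaItems_alt (alt : String) (rawMeta : String) (snpEffItems : List (String × String)) : List (String × String) :=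
  let st := (pvEntries rawMeta).foldl (pvStep alt.toList)
    (([], false), ([], false), ([], false), ([], false), ([], false))
  [("VariantEffect", pvJoinSorted (snpEffItems.map (fun x => x.1))),
   ("VariantImpactLevel", pvJoinSorted (snpEffItems.map (fun x => x.2))),
   ("SIFT", String.ofList st.1.1),
   ("Polyphen", String.ofList st.2.1.1),
   ("MutAssr", String.ofList st.2.2.1.1),
   ("CondelScore", String.ofList st.2.2.2.1.1),
   ("CondelCall", String.ofList st.2.2.2.2.1)]

-- ===== PRECONDITION & SPEC =====
-- Pre_ excludes the inputs on which the Python raises IndexError: a ';'-entry that starts with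
-- one of the five keys but has no '__' before its first '=', or whose '__'-tag equals alt while
-- the entry has no '='.  This is slightly narrower than 'A returns': such a malformed entry is
-- harmless when an earlier entry already matched that key (see claim.json cites).
def Pre_summarizeMetaItems (alt : String) (rawMeta : String) (snpEffItems : List (String × String)) : Prop :=
  ∀ e ∈ pvEntries rawMeta,
    ∀ k ∈ ["SIFT".toList, "Polyphen".toList, "MutAssr".toList, "CondelScore".toList, "CondelCall".toList],
      PySem.Chars.startswith e k = true →
        2 ≤ (pvTagParts e).length ∧
        (pvTag e = alt.toList → 2 ≤ (PySem.Chars.splitOn e "=".toList).length)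
instance (alt : String) (rawMeta : String) (snpEffItems : List (String × String)) : Decidable (Pre_summarizeMetaItems alt rawMeta snpEffItems) := by unfold Pre_summarizeMetaItems; infer_instance

def pvWitness_summarizeMetaItems : String × String × (List (String × String)) :=
  ("A", "SIFT__A=0.91;Polyphen__A=benign", [("x", "HIGH"), ("y", "LOW")])

def Spec_summarizeMetaItems (alt : String) (rawMeta : String) (snpEffItems : List (String × String)) (out : List (String × String)) : Prop := out = summarizeMetaItems_alt alt rawMeta snpEffItems
instance (alt : String) (rawMeta : String) (snpEffItems : List (String × String)) (out : List (String × String)) : Decidable (Spec_summarizeMetaItems alt rawMeta snpEffItems out) := by unfold Spec_summarizeMetaItems; infer_instance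

-- ===== CLAIM (what is proved, stated in full; the proofs are below) =====
def Claim_equal_summarizeMetaItems : Prop := ∀ (alt : String) (rawMeta : String) (snpEffItems : List (String × String)), Dom_summarizeMetaItems alt rawMeta snpEffItems → Pre_summarizeMetaItems alt rawMeta snpEffItems → Spec_summarizeMetaItems alt rawMeta snpEffItems (summarizeMetaItems alt rawMeta snpEffItems)

-- ===== LEMMAS AND PROOFS =====

-- a key whose state is already found is never changed
theorem foldl_upd_found (alt k : List Char) (l : List (List Char)) (w : List Char) :
    l.foldl (pvUpd alt k) (w, true) = (w, true) := by
  induction l with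
  | nil => rfl
  | cons e rest ih => simp [List.foldl_cons, pvUpd, ih]

-- A's scan returns [] ("") when no entry matches
theorem scanA_of_no_match (alt k : List Char) (l : List (List Char))
    (h : l.any (fun e => PySem.Chars.startswith e k && (alt == pvTag e)) = false) :
    pvScanA alt k l = [] := by
  induction l with
  | nil => rfl
  | cons e rest ih =>
    simp only [List.any_cons, Bool.or_eq_false_iff] at h
    simp [pvScanA, h.1, ih h.2]

-- one key's single-pass state, from a not-yet-found state, ends at A's scan result (or keeps v)
theorem foldl_upd_eq_scanA (alt k : List Char) (l : List (List Char)) (v : List Char) :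
    (l.foldl (pvUpd alt k) (v, false)).1 =
      if l.any (fun e => PySem.Chars.startswith e k && (alt == pvTag e)) then pvScanA alt k l else v := by
  induction l generalizing v with
  | nil => rfl
  | cons e rest ih =>
    by_cases hc : (PySem.Chars.startswith e k && (alt == pvTag e)) = true
    · simp [List.foldl_cons, pvUpd, hc, foldl_upd_found, pvScanA]
    · simp [List.foldl_cons, pvUpd, hc, ih, pvScanA]

-- from the initial state the single-pass value for key k is exactly A's scan
theorem foldl_upd_init (alt k : List Char) (l : List (List Char)) :
    (l.foldl (pvUpd alt k) ([], false)).1 = pvScanA alt k l := by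
  rw [foldl_upd_eq_scanA]
  by_cases h : l.any (fun e => PySem.Chars.startswith e k && (alt == pvTag e)) = true
  · simp [h]
  · simp only [Bool.not_eq_true] at h
    simp [h, scanA_of_no_match alt k l h]

-- B's five-field fold acts componentwise
theorem foldl_step_proj (alt : List Char) (l : List (List Char))
    (st : (List Char × Bool) × (List Char × Bool) × (List Char × Bool) × (List Char × Bool) × (List Char × Bool)) :
    l.foldl (pvStep alt) st =
      (l.foldl (pvUpd alt "SIFT".toList) st.1,
       l.foldl (pvUpd alt "Polyphen".toList) st.2.1,
       l.foldl (pvUpd alt "MutAssr".toList) st.2.2.1,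
       l.foldl (pvUpd alt "CondelScore".toList) st.2.2.2.1,
       l.foldl (pvUpd alt "CondelCall".toList) st.2.2.2.2) := by
  induction l generalizing st with
  | nil => rfl
  | cons e rest ih => simp [List.foldl_cons, ih, pvStep]

-- ===== VERDICT (by name: the statement is the Claim_ definition above) =====
theorem summarizeMetaItems_spec : Claim_equal_summarizeMetaItems := by
  intro alt rawMeta snpEffItems _hDom _hPre
  unfold Spec_summarizeMetaItems summarizeMetaItems summarizeMetaItems_alt parsePathogenicityValue
  simp only [foldl_step_proj, foldl_upd_init]
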